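-- pv_equiv track=rewrite | github.com/chobojajg/codequiz | 프로그래머스/1/138477. 명예의 전당 （1）/명예의 전당 （1）.py | solution
-- ===== SOURCE A (Python) =====
-- def solution(k, score):
--     answer = []
--     result = []
--     for i in score:
--         if len(answer) == 0:
--             answer.append(i)
--         else:
--             answer.append(i)
--             answer.sort()
--         if len(answer) > k:
--             answer.pop(0)
--         result.append(answer[0])
--     return result
-- ===== SOURCE B (Python) =====
-- def _insort(top, i):
--     # binary search for the insertion point (after equal values), then insert
--     lo, hi = 0, len(top)
--     while lo < hi:
--         mid = (lo + hi) // 2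
--         if top[mid] <= i:
--             lo = mid + 1
--         else:
--             hi = mid
--     top.insert(lo, i)
--
-- def solution(k, score):
--     top = []        # the kept scores, ascending
--     result = []
--     for i in score:
--         if len(top) < k:
--             _insort(top, i)
--         elif i > top[0]:
--             del top[0]
--             _insort(top, i)
--         result.append(top[0])
--     return result
-- ===== Notes on version B (the rewrite author's own statement) =====
-- stated objective: faster
-- what changed: Instead of appending and fully re-sorting the kept top-k list at every step, B keeps the list sorted and places each new score by hand-written binary search (bisect-style insertion), deleting the head when the pool is full.
import Mathlib
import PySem

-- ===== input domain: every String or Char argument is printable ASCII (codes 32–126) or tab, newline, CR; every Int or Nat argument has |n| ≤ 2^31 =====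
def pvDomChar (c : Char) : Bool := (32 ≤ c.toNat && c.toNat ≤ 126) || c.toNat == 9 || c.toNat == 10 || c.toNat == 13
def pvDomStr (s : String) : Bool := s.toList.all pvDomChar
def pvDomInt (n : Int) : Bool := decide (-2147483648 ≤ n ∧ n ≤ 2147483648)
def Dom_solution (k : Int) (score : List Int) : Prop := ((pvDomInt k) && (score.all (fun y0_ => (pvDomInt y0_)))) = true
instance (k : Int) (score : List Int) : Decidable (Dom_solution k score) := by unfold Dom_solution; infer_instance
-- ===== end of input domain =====

-- B replaces A's per-step append+sort of the kept top-k list by binary-search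
-- insertion into a list kept sorted (objective: faster, measured on large inputs).


-- ===== PORT A =====
-- one iteration of A's for-loop: state = (answer, result)
def solutionStepA (k : Int) (st : List Int × List Int) (i : Int) : List Int × List Int :=
  let answer := st.1
  let answer :=
    if answer.length = 0 then answer ++ [i]                       -- answer.append(i)
    else PySem.List.sorted (answer ++ [i]) (fun x => x) false     -- answer.append(i); answer.sort()
  let answer :=
    if (answer.length : Int) > k then
      ((PySem.List.pop? answer 0).map Prod.snd).getD answer       -- answer.pop(0); exact: answer nonempty here
    else answer
  -- answer[0]: raises iff answer = [], which Pre_solution excludes; the getD 0 case is unreachable inside Pre_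
  (answer, st.2 ++ [(PySem.List.pyGet? answer 0).getD 0])

def solution (k : Int) (score : List Int) : List Int :=
  (score.foldl (solutionStepA k) ([], [])).2

-- ===== PORT B =====
-- termination helper for the binary-search loop (floor midpoint lies in [lo, hi))
theorem pv_mid_bounds (lo hi : Int) (h : lo < hi) :
    lo ≤ PySem.Int.floordiv (lo + hi) 2 ∧ PySem.Int.floordiv (lo + hi) 2 < hi := by
  unfold PySem.Int.floordiv
  rw [Int.fdiv_eq_ediv, if_pos (Or.inl (by omega))]
  omega

-- the while-loop of B's _insort: binary search for the insertion point
def insortLoop (top : List Int) (i : Int) (lo hi : Int) : Int :=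
  if h : lo < hi then
    let mid := PySem.Int.floordiv (lo + hi) 2                     -- mid = (lo + hi) // 2
    -- top[mid]: 0 ≤ lo ≤ mid < hi ≤ len(top) on every call _insort makes, so never an IndexError
    if (PySem.List.pyGet? top mid).getD 0 ≤ i then insortLoop top i (mid + 1) hi
    else insortLoop top i lo mid
  else lo
termination_by (hi - lo).toNat
decreasing_by
  · have hb := pv_mid_bounds lo hi h; omega
  · have hb := pv_mid_bounds lo hi h; omega

-- B's _insort: binary search, then top.insert(lo, i)
def insort (top : List Int) (i : Int) : List Int :=
  PySem.List.insert top (insortLoop top i 0 (top.length : Int)) i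

-- one iteration of B's for-loop: state = (top, result)
def solutionStepB (k : Int) (st : List Int × List Int) (i : Int) : List Int × List Int :=
  let top := st.1
  let top :=
    if (top.length : Int) < k then insort top i
    -- top[0]: raises iff top = [], which Pre_solution excludes
    else if i > (PySem.List.pyGet? top 0).getD 0 then
      insort (((PySem.List.pop? top 0).map Prod.snd).getD top) i  -- del top[0]; exact: top nonempty here
    else top
  -- top[0]: raises iff top = [], which Pre_solution excludes
  (top, st.2 ++ [(PySem.List.pyGet? top 0).getD 0])

def solution_alt (k : Int) (score : List Int) : List Int :=
  (score.foldl (solutionStepB k) ([], [])).2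

-- ===== PRECONDITION & SPEC =====
-- A raises (IndexError on answer[0]) iff k ≤ 0 and score ≠ [] (B raises IndexError there too).
def Pre_solution (k : Int) (score : List Int) : Prop := score = [] ∨ 1 ≤ k
instance (k : Int) (score : List Int) : Decidable (Pre_solution k score) := by unfold Pre_solution; infer_instance
def pvWitness_solution : Int × List Int := (2, [10, 20, 5, 30])

def Spec_solution (k : Int) (score : List Int) (out : List Int) : Prop := out = solution_alt k score
instance (k : Int) (score : List Int) (out : List Int) : Decidable (Spec_solution k score out) := by unfold Spec_solution; infer_instance

-- ===== CLAIM (what is proved, stated in full; the proofs are below) =====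
def Claim_equal_solution : Prop := ∀ (k : Int) (score : List Int), Dom_solution k score → Pre_solution k score → Spec_solution k score (solution k score)

-- ===== LEMMAS AND PROOFS =====

-- PySem.List.insert at an in-range index is take ++ value :: drop
theorem pv_insert_eq (xs : List Int) (r : Int) (v : Int) (h0 : 0 ≤ r) (h1 : r ≤ (xs.length : Int)) :
    PySem.List.insert xs r v = xs.take r.toNat ++ v :: xs.drop r.toNat := by
  unfold PySem.List.insert PySem.List.sliceIndices
  simp only [if_neg (by omega : ¬ ((1:Int) < 0)), if_neg (by omega : ¬ (r < 0)),
    min_eq_left h1]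

-- specification of the binary-search loop, by strong induction on hi - lo
theorem pv_insortLoop_spec (top : List Int) (i : Int) (hs : top.Pairwise (· ≤ ·)) :
    ∀ (fuel : Nat) (lo hi : Int), (hi - lo).toNat = fuel → 0 ≤ lo → lo ≤ hi → hi ≤ (top.length : Int) →
    (∀ (j : Nat) (hj : j < top.length), (j : Int) < lo → top[j] ≤ i) →
    (∀ (j : Nat) (hj : j < top.length), hi ≤ (j : Int) → i < top[j]) →
    0 ≤ insortLoop top i lo hi ∧ insortLoop top i lo hi ≤ (top.length : Int) ∧
    (∀ (j : Nat) (hj : j < top.length), (j : Int) < insortLoop top i lo hi → top[j] ≤ i) ∧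
    (∀ (j : Nat) (hj : j < top.length), insortLoop top i lo hi ≤ (j : Int) → i < top[j]) := by
  intro fuel
  induction fuel using Nat.strong_induction_on with
  | _ fuel ih =>
    intro lo hi hfuel h0 hlh hhi hlow hhigh
    rw [insortLoop]
    by_cases hlt : lo < hi
    · rw [dif_pos hlt]
      have hb := pv_mid_bounds lo hi hlt
      have hmono := List.pairwise_iff_getElem.mp hs
      have hmlen : (PySem.Int.floordiv (lo + hi) 2).toNat < top.length := by omega
      have hget : PySem.List.pyGet? top (PySem.Int.floordiv (lo + hi) 2)
          = some top[(PySem.Int.floordiv (lo + hi) 2).toNat] :=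
        PySem.List.pyGet?_eq_some_getElem top (by omega) (by omega)
      simp only [hget, Option.getD_some]
      by_cases hcmp : top[(PySem.Int.floordiv (lo + hi) 2).toNat] ≤ i
      · rw [if_pos hcmp]
        refine ih (hi - (PySem.Int.floordiv (lo + hi) 2 + 1)).toNat (by omega)
          _ _ rfl (by omega) (by omega) hhi ?_ hhigh
        intro j hj hjlt
        rcases Nat.lt_or_ge j (PySem.Int.floordiv (lo + hi) 2).toNat with hjm | hjm
        · exact le_trans (hmono j (PySem.Int.floordiv (lo + hi) 2).toNat hj hmlen hjm) hcmp
        · have : j = (PySem.Int.floordiv (lo + hi) 2).toNat := by omega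
          subst this; exact hcmp
      · rw [if_neg hcmp]
        refine ih (PySem.Int.floordiv (lo + hi) 2 - lo).toNat (by omega)
          _ _ rfl h0 (by omega) (by omega) hlow ?_
        intro j hj hjge
        rcases Nat.lt_or_ge (PySem.Int.floordiv (lo + hi) 2).toNat j with hjm | hjm
        · exact lt_of_lt_of_le (lt_of_not_ge hcmp)
            (hmono (PySem.Int.floordiv (lo + hi) 2).toNat j hmlen hj hjm)
        · have : j = (PySem.Int.floordiv (lo + hi) 2).toNat := by omega
          subst this; exact lt_of_not_ge hcmp
    · rw [dif_neg hlt]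
      have hlo : lo = hi := by omega
      exact ⟨h0, by omega, hlow, fun j hj hge => hhigh j hj (by omega)⟩

-- insort inserts i into a sorted list: a sorted rearrangement of top ++ [i]
theorem pv_insort_spec (top : List Int) (i : Int) (hs : top.Pairwise (· ≤ ·)) :
    (insort top i).Perm (top ++ [i]) ∧ (insort top i).Pairwise (· ≤ ·) := by
  obtain ⟨hr0, hrlen, hle, hgt⟩ := pv_insortLoop_spec top i hs
    ((top.length : Int) - 0).toNat 0 (top.length : Int) rfl (by omega) (by omega) (by omega)
    (fun j hj hjlt => absurd hjlt (by omega))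
    (fun j hj hge => absurd hge (by omega))
  rw [insort, pv_insert_eq top _ i hr0 hrlen]
  constructor
  · have hp1 : (i :: top.drop (insortLoop top i 0 (top.length : Int)).toNat).Perm
        (top.drop (insortLoop top i 0 (top.length : Int)).toNat ++ [i]) :=
      (List.perm_append_singleton _ _).symm
    have hp2 := hp1.append_left (top.take (insortLoop top i 0 (top.length : Int)).toNat)
    have : top.take (insortLoop top i 0 (top.length : Int)).toNat ++
        (top.drop (insortLoop top i 0 (top.length : Int)).toNat ++ [i])
        = top ++ [i] := by rw [← List.append_assoc, List.take_append_drop]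
    rw [this] at hp2
    exact hp2
  · rw [List.pairwise_append]
    refine ⟨hs.sublist (List.take_sublist _ _), ?_, ?_⟩
    · rw [List.pairwise_cons]
      refine ⟨?_, hs.sublist (List.drop_sublist _ _)⟩
      intro y hy
      obtain ⟨j, hm, hjy⟩ := List.mem_drop_iff_getElem.mp hy
      exact le_of_lt (hjy ▸ hgt _ (by omega) (by omega))
    · intro x hx y hy
      obtain ⟨j, hm, hjx⟩ := List.mem_take_iff_getElem.mp hx
      have hxi : x ≤ i := hjx ▸ hle j (by omega) (by omega)
      rcases List.mem_cons.mp hy with rfl | hy2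
      · exact hxi
      · obtain ⟨j2, hm2, hjy⟩ := List.mem_drop_iff_getElem.mp hy2
        exact le_trans hxi (le_of_lt (hjy ▸ hgt _ (by omega) (by omega)))

-- A's per-step sort equals B's binary insertion (sorted Int lists are unique in their perm class)
theorem pv_sorted_insort (top : List Int) (i : Int) (hs : top.Pairwise (· ≤ ·)) :
    PySem.List.sorted (top ++ [i]) (fun x => x) false = insort top i :=
  PySem.List.sorted_id_eq_of_perm_of_pairwise _ _
    (pv_insort_spec top i hs).1 (pv_insort_spec top i hs).2

theorem pv_insort_length (top : List Int) (i : Int) (hs : top.Pairwise (· ≤ ·)) :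
    (insort top i).length = top.length + 1 := by
  have := (pv_insort_spec top i hs).1.length_eq
  simpa using this

-- one step: the two loop bodies produce identical states, and A's list stays sorted
theorem pv_step (k : Int) (hk : 1 ≤ k) (i : Int) (ans res : List Int)
    (hp : ans.Pairwise (· ≤ ·)) :
    solutionStepA k (ans, res) i = solutionStepB k (ans, res) i ∧
    ((solutionStepA k (ans, res) i).1).Pairwise (· ≤ ·) := by
  have h1 : (if ans.length = 0 then ans ++ [i]
      else PySem.List.sorted (ans ++ [i]) (fun x => x) false)
      = PySem.List.sorted (ans ++ [i]) (fun x => x) false := by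
    by_cases h0 : ans.length = 0
    · have hnil : ans = [] := List.length_eq_zero_iff.mp h0
      subst hnil
      rw [if_pos h0]
      exact (PySem.List.sorted_eq_self_of_pairwise _ _ (by simp)).symm
    · rw [if_neg h0]
  by_cases hc : (ans.length : Int) < k
  · -- room in the pool: both insert i and keep everything
    have hsi := pv_sorted_insort ans i hp
    have hlen := pv_insort_length ans i hp
    have hcA : ¬ (((insort ans i).length : Int) > k) := by omega
    simp only [solutionStepA, solutionStepB]
    rw [h1, hsi, if_neg hcA, if_pos hc]
    exact ⟨rfl, (pv_insort_spec ans i hp).2⟩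
  · -- pool full: A sorts then pops the head; B branches on i > top[0]
    obtain ⟨h0, t, rfl⟩ := List.exists_cons_of_ne_nil (l := ans)
      (by intro hnil; rw [hnil] at hc; simp at hc; omega)
    simp only [List.length_cons] at hc
    have ht : t.Pairwise (· ≤ ·) := hp.of_cons
    have hh0 : ∀ y ∈ t, h0 ≤ y := (List.pairwise_cons.mp hp).1
    have hget0 : PySem.List.pyGet? (h0 :: t) 0 = some h0 := PySem.List.pyGet?_zero_cons _ _
    by_cases hgt : i > h0
    · -- replace-min: sorted((h0::t) ++ [i]) = h0 :: insort t i, and both pop/del h0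
      have hsi := pv_sorted_insort t i ht
      have key : PySem.List.sorted ((h0 :: t) ++ [i]) (fun x => x) false = h0 :: insort t i := by
        apply PySem.List.sorted_id_eq_of_perm_of_pairwise
        · exact (pv_insort_spec t i ht).1.cons h0
        · rw [List.pairwise_cons]
          refine ⟨?_, (pv_insort_spec t i ht).2⟩
          intro y hy
          have : y ∈ t ++ [i] := (pv_insort_spec t i ht).1.mem_iff.mp hy
          rcases List.mem_append.mp this with hy2 | hy2
          · exact hh0 y hy2
          · simp at hy2; omega
      have hlen : (insort t i).length = t.length + 1 := pv_insort_length t i ht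
      have hcA : (((h0 :: insort t i).length : Int) > k) := by
        simp only [List.length_cons]; push_cast; omega
      simp only [solutionStepA, solutionStepB]
      rw [h1, key, if_pos hcA]
      rw [if_neg (show ¬ (((h0 :: t).length : Int) < k) by
        simp only [List.length_cons]; push_cast; omega), hget0]
      rw [if_pos (by simpa using hgt)]
      simp only [PySem.List.pop?_zero_cons, Option.map_some, Option.getD_some]
      exact ⟨trivial, (pv_insort_spec t i ht).2⟩
    · -- i ≤ top[0]: sorted((h0::t) ++ [i]) = i :: h0 :: t, A pops i back off; B keeps the pool
      have key : PySem.List.sorted ((h0 :: t) ++ [i]) (fun x => x) false = i :: h0 :: t := by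
        apply PySem.List.sorted_id_eq_of_perm_of_pairwise
        · exact (List.perm_append_singleton i (h0 :: t)).symm
        · rw [List.pairwise_cons]
          refine ⟨?_, hp⟩
          intro y hy
          rcases List.mem_cons.mp hy with rfl | hy2
          · omega
          · exact le_trans (by omega) (hh0 y hy2)
      have hcA : (((i :: h0 :: t).length : Int) > k) := by
        simp only [List.length_cons]; push_cast; omega
      simp only [solutionStepA, solutionStepB]
      rw [h1, key, if_pos hcA]
      rw [if_neg (show ¬ (((h0 :: t).length : Int) < k) by
        simp only [List.length_cons]; push_cast; omega), hget0]
      rw [if_neg (by simpa using hgt)]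
      simp only [PySem.List.pop?_zero_cons, Option.map_some, Option.getD_some]
      exact ⟨trivial, hp⟩

theorem pv_fold (k : Int) (hk : 1 ≤ k) : ∀ (score ans res : List Int),
    ans.Pairwise (· ≤ ·) →
    score.foldl (solutionStepA k) (ans, res) = score.foldl (solutionStepB k) (ans, res) := by
  intro score
  induction score with
  | nil => intro ans res _; rfl
  | cons i rest ih =>
    intro ans res hp
    obtain ⟨heq, hpw⟩ := pv_step k hk i ans res hp
    simp only [List.foldl_cons]
    rw [← heq]
    have hpair : solutionStepA k (ans, res) i
        = ((solutionStepA k (ans, res) i).1, (solutionStepA k (ans, res) i).2) := rfl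
    rw [hpair]
    exact ih _ _ hpw

-- ===== VERDICT (by name: the statement is the Claim_ definition above) =====
theorem solution_spec : Claim_equal_solution := by
  intro k score _ hpre
  unfold Spec_solution solution solution_alt
  rcases hpre with h | h
  · subst h; rfl
  · rw [pv_fold k h score [] [] (by simp)]
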